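-- pv_equiv track=rewrite | github.com/manwar/perlweeklychallenge-club | challenge-109/roger-bell-west/python/ch-1.py | chowla
-- ===== SOURCE A (Python) =====
-- def chowla(count):
--     a=[]
--     for n in range(1,count+1):
--         s=0
--         for i in range(2,n):
--             if n % i == 0:
--                 s += i
--         a.append(s)
--     return a
-- ===== SOURCE B (Python) =====
-- def chowla(count):
--     s = [0] * (count + 1)
--     for i in range(2, count // 2 + 1):
--         for m in range(2 * i, count + 1, i):
--             s[m] += i
--     return s[1:]
-- ===== Notes on version B (the rewrite author's own statement) =====
-- stated objective: faster
-- what changed: Replaced the per-n trial scan over all candidate divisors by a divisor sieve that adds each i once to every multiple of i, then slices the accumulator.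
import Mathlib
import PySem

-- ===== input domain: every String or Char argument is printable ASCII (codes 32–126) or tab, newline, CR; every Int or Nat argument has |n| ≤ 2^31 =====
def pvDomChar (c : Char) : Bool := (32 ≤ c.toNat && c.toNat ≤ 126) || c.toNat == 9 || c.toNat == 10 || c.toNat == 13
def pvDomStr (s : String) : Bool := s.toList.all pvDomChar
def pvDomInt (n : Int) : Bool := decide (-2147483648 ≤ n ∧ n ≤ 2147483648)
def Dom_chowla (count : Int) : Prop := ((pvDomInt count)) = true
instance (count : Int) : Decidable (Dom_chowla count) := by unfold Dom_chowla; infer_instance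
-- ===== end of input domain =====

-- B replaces A's per-n trial scan over all candidate divisors by a divisor sieve
-- (each i is added once to every multiple of i); objective: faster.

-- ===== PORT A =====
def chowla (count : Int) : List Int :=
  (PySem.List.pyRange 1 (count + 1) 1).foldl
    (fun a n =>
      a ++ [(PySem.List.pyRange 2 n 1).foldl
              (fun s i => if PySem.Int.mod n i = 0 then s + i else s) 0]) []

-- ===== PORT B =====
-- 's[m] += i' is ported by hand via List.set / List.getD; this is exact here because
-- every visited index m satisfies 0 < m < len(s).
def chowla_alt (count : Int) : List Int :=
  let s0 : List Int := List.replicate (count + 1).toNat 0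
  let s :=
    (PySem.List.pyRange 2 (PySem.Int.floordiv count 2 + 1) 1).foldl
      (fun s i =>
        (PySem.List.pyRange (2 * i) (count + 1) i).foldl
          (fun s m => s.set m.toNat (s.getD m.toNat 0 + i)) s) s0
  PySem.List.slice s (some 1) none

-- ===== PRECONDITION & SPEC =====
def Spec_chowla (count : Int) (out : List Int) : Prop := out = chowla_alt count
instance (count : Int) (out : List Int) : Decidable (Spec_chowla count out) := by unfold Spec_chowla; infer_instance

-- ===== CLAIM (what is proved, stated in full; the proofs are below) =====
def Claim_equal_chowla : Prop := ∀ (count : Int), Dom_chowla count → Spec_chowla count (chowla count)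

-- ===== LEMMAS AND PROOFS =====

-- A's inner loop is the sum of the filtered range
theorem foldl_if_mod_sum (n : Int) (l : List Int) (c : Int) :
    l.foldl (fun s i => if PySem.Int.mod n i = 0 then s + i else s) c
      = c + (l.filter (fun i => decide (PySem.Int.mod n i = 0))).sum := by
  induction l generalizing c with
  | nil => simp
  | cons x t ih =>
    simp only [List.foldl_cons, List.filter_cons, ih]
    by_cases h : PySem.Int.mod n x = 0 <;> simp [h] <;> ring

-- the sieve's inner loop preserves the length of the accumulator
theorem sieve_inner_length (i : Int) (l : List Int) (s : List Int) :
    (l.foldl (fun s m => s.set m.toNat (s.getD m.toNat 0 + i)) s).length = s.length := by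
  induction l generalizing s with
  | nil => rfl
  | cons m t ih => rw [List.foldl_cons, ih]; simp

-- the sieve's inner loop adds i at index k once per occurrence of k in l
theorem sieve_inner_getD (i : Int) (l : List Int) (s : List Int)
    (hl : ∀ m ∈ l, 0 < m ∧ m.toNat < s.length) (k : Nat) :
    (l.foldl (fun s m => s.set m.toNat (s.getD m.toNat 0 + i)) s).getD k 0
      = s.getD k 0 + i * l.count (k : Int) := by
  induction l generalizing s with
  | nil => simp
  | cons m t ih =>
    obtain ⟨hm, hlen⟩ := hl m (List.mem_cons_self)
    rw [List.foldl_cons, ih _ (fun m' hm' => by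
      simpa [List.length_set] using hl m' (List.mem_cons_of_mem _ hm'))]
    rw [List.count_cons]
    by_cases h : m.toNat = k
    · have hk : (k : Int) = m := by omega
      have : (s.set m.toNat (s.getD m.toNat 0 + i)).getD k 0 = s.getD m.toNat 0 + i := by
        subst h
        simp [List.getD, List.getElem?_set_self hlen]
      rw [this, hk]
      rw [h]
      simp only [beq_self_eq_true, if_true]
      push_cast
      ring
    · have hk : ¬ (m = (k : Int)) := by omega
      have : (s.set m.toNat (s.getD m.toNat 0 + i)).getD k 0 = s.getD k 0 := by
        simp [List.getD, List.getElem?_set_ne h]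
      rw [this]
      simp [hk]

-- occurrence count of m in the multiples range of i
theorem count_multiples (count i m : Int) (hi : 2 ≤ i) :
    (PySem.List.pyRange (2 * i) (count + 1) i).count m
      = if i ∣ m ∧ 2 * i ≤ m ∧ m ≤ count then 1 else 0 := by
  have hpos : (0:Int) < i := by omega
  have hnd : (PySem.List.pyRange (2 * i) (count + 1) i).Nodup := by
    rw [PySem.List.pyRange_of_pos _ _ hpos]
    refine List.Nodup.map ?_ (List.nodup_range)
    intro a b hab
    simp only at hab
    have h1 : i * (a : Int) = i * b := by linarith
    have h2 : (a : Int) = b := mul_left_cancel₀ (show i ≠ 0 by omega) h1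
    exact_mod_cast h2
  have hmem : m ∈ PySem.List.pyRange (2 * i) (count + 1) i ↔ (i ∣ m ∧ 2 * i ≤ m ∧ m ≤ count) := by
    rw [PySem.List.mem_pyRange_iff_of_pos hpos]
    constructor
    · rintro ⟨h1, h2, h3⟩
      refine ⟨?_, h1, by omega⟩
      simpa using dvd_add h3 (dvd_mul_left i 2)
    · rintro ⟨h1, h2, h3⟩
      exact ⟨h2, by omega, dvd_sub h1 (dvd_mul_left i 2)⟩
  by_cases h : i ∣ m ∧ 2 * i ≤ m ∧ m ≤ count
  · rw [if_pos h]
    exact List.count_eq_one_of_mem hnd (hmem.mpr h)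
  · rw [if_neg h]
    exact List.count_eq_zero_of_not_mem (fun hm => h (hmem.mp hm))

-- the sieve proper, parameterised by the exclusive upper bound of the i-loop
def sieveFold (count hi : Int) : List Int :=
  (PySem.List.pyRange 2 hi 1).foldl
    (fun s i =>
      (PySem.List.pyRange (2 * i) (count + 1) i).foldl
        (fun s m => s.set m.toNat (s.getD m.toNat 0 + i)) s)
    (List.replicate (count + 1).toNat 0)

theorem chowla_alt_eq (count : Int) :
    chowla_alt count
      = PySem.List.slice (sieveFold count (PySem.Int.floordiv count 2 + 1)) (some 1) none := rfl

theorem sieve_outer_length (count : Int) (L : List Int) (s : List Int) :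
    (L.foldl (fun s i =>
      (PySem.List.pyRange (2 * i) (count + 1) i).foldl
        (fun s m => s.set m.toNat (s.getD m.toNat 0 + i)) s) s).length = s.length := by
  induction L generalizing s with
  | nil => rfl
  | cons x t ih => rw [List.foldl_cons, ih, sieve_inner_length]

theorem sieveFold_length (count hi : Int) :
    (sieveFold count hi).length = (count + 1).toNat := by
  unfold sieveFold
  rw [sieve_outer_length, List.length_replicate]

theorem sieveFold_getD (count : Int) (j : Nat) (k : Nat) :
    (sieveFold count (2 + j)).getD k 0
      = ((PySem.List.pyRange 2 (2 + (j : Int)) 1).filter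
          (fun i => decide (i ∣ (k : Int) ∧ 2 * i ≤ (k : Int) ∧ (k : Int) ≤ count))).sum := by
  induction j with
  | zero =>
    rw [show ((0:Nat):Int) = 0 by rfl, add_zero]
    unfold sieveFold
    rw [PySem.List.pyRange_one_eq_nil (le_refl 2)]
    have hgetD : (List.replicate (count + 1).toNat (0:Int)).getD k 0 = 0 := by
      by_cases h : k < (count + 1).toNat
      · exact List.getD_replicate _ h
      · have hle : (List.replicate (count + 1).toNat (0:Int)).length ≤ k := by
          simpa using Nat.le_of_not_lt h
        simp [List.getD, List.getElem?_eq_none hle]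
    simp only [List.filter_nil, List.foldl_nil, List.sum_nil]
    exact hgetD
  | succ j ih =>
    have hcast : (2 + ((j+1 : Nat) : Int)) = (2 + (j:Int)) + 1 := by push_cast; ring
    rw [hcast]
    unfold sieveFold
    rw [PySem.List.pyRange_one_succ_right (show (2:Int) ≤ 2 + j by omega),
        List.foldl_append, List.foldl_cons, List.foldl_nil]
    have hlen : ∀ m ∈ PySem.List.pyRange (2 * (2 + (j:Int))) (count + 1) (2 + (j:Int)),
        0 < m ∧ m.toNat < (sieveFold count (2 + (j:Int))).length := by
      intro m hm
      rw [PySem.List.mem_pyRange_iff_of_pos (by omega)] at hm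
      rw [sieveFold_length]
      omega
    rw [show (List.foldl (fun s i =>
          List.foldl (fun s m => s.set m.toNat (s.getD m.toNat 0 + i)) s
            (PySem.List.pyRange (2 * i) (count + 1) i))
          (List.replicate (count + 1).toNat 0) (PySem.List.pyRange 2 (2 + (j:Int))))
        = sieveFold count (2 + (j:Int)) from rfl]
    rw [sieve_inner_getD _ _ _ hlen k]
    rw [ih]
    rw [List.filter_append, List.sum_append, List.filter_cons, List.filter_nil]
    rw [count_multiples count _ _ (by omega)]
    by_cases h : (2 + (j:Int)) ∣ (k:Int) ∧ 2 * (2 + (j:Int)) ≤ (k:Int) ∧ (k:Int) ≤ count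
    · simp [h]
    · simp [h]

-- a divisor i of n with 2 ≤ i < n satisfies 2*i ≤ n
theorem two_mul_le_of_dvd (n i : Int) (h2 : 2 ≤ i) (hlt : i < n) (hd : i ∣ n) :
    2 * i ≤ n := by
  obtain ⟨c, rfl⟩ := hd
  have hc : 1 < c := by nlinarith
  nlinarith

-- A's filtered divisor sum equals B's filtered divisor sum, for 1 ≤ n ≤ count, 2 ≤ count
theorem filter_sum_eq (count n : Int) (hc : 2 ≤ count) (h1 : 1 ≤ n) (hn : n ≤ count) :
    ((PySem.List.pyRange 2 n 1).filter (fun i => decide (PySem.Int.mod n i = 0))).sum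
      = ((PySem.List.pyRange 2 (PySem.Int.floordiv count 2 + 1) 1).filter
          (fun i => decide (i ∣ n ∧ 2 * i ≤ n ∧ n ≤ count))).sum := by
  rw [PySem.Int.floordiv_eq_ediv_of_pos (by norm_num)]
  have hR : ((PySem.List.pyRange 2 (count + 1) 1).filter
        (fun i => decide (i ∣ n ∧ 2 * i ≤ n ∧ n ≤ count))).sum
      = ((PySem.List.pyRange 2 (count / 2 + 1) 1).filter
        (fun i => decide (i ∣ n ∧ 2 * i ≤ n ∧ n ≤ count))).sum := by
    rw [PySem.List.pyRange_one_append 2 (count / 2 + 1) (count + 1) (by omega) (by omega),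
        List.filter_append, List.sum_append]
    have : (PySem.List.pyRange (count / 2 + 1) (count + 1) 1).filter
        (fun i => decide (i ∣ n ∧ 2 * i ≤ n ∧ n ≤ count)) = [] := by
      rw [List.filter_eq_nil_iff]
      intro i hi
      rw [PySem.List.mem_pyRange_one] at hi
      simp only [decide_eq_true_eq]
      rintro ⟨-, hle, -⟩
      omega
    rw [this]
    simp
  rw [← hR]
  by_cases h2 : 2 ≤ n
  · rw [PySem.List.pyRange_one_append 2 n (count + 1) (by omega) (by omega),
        List.filter_append, List.sum_append]
    have hnil : (PySem.List.pyRange n (count + 1) 1).filter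
        (fun i => decide (i ∣ n ∧ 2 * i ≤ n ∧ n ≤ count)) = [] := by
      rw [List.filter_eq_nil_iff]
      intro i hi
      rw [PySem.List.mem_pyRange_one] at hi
      simp only [decide_eq_true_eq]
      rintro ⟨-, hle, -⟩
      omega
    rw [hnil]
    have hcg : (PySem.List.pyRange 2 n 1).filter (fun i => decide (PySem.Int.mod n i = 0))
        = (PySem.List.pyRange 2 n 1).filter (fun i => decide (i ∣ n ∧ 2 * i ≤ n ∧ n ≤ count)) := by
      apply List.filter_congr
      intro x hx
      rw [PySem.List.mem_pyRange_one] at hx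
      simp only [decide_eq_decide]
      rw [PySem.Int.mod_eq_zero_iff_dvd]
      constructor
      · intro hd
        exact ⟨hd, two_mul_le_of_dvd n x hx.1 hx.2 hd, hn⟩
      · exact fun h => h.1
    rw [hcg]
    simp
  · have hn1 : n = 1 := by omega
    subst hn1
    rw [PySem.List.pyRange_one_eq_nil (by omega)]
    have : (PySem.List.pyRange 2 (count + 1) 1).filter
        (fun i => decide (i ∣ (1:Int) ∧ 2 * i ≤ 1 ∧ 1 ≤ count)) = [] := by
      rw [List.filter_eq_nil_iff]
      intro i hi
      rw [PySem.List.mem_pyRange_one] at hi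
      simp only [decide_eq_true_eq]
      rintro ⟨-, hle, -⟩
      omega
    rw [this]
    simp

-- ===== VERDICT (by name: the statement is the Claim_ definition above) =====
theorem chowla_spec : Claim_equal_chowla := by
  intro count _
  unfold Spec_chowla
  by_cases hc0 : count ≤ 0
  · have h2' : PySem.Int.floordiv count 2 + 1 ≤ 2 := by
      rw [PySem.Int.floordiv_eq_ediv_of_pos (by norm_num)]
      omega
    have e : chowla_alt count = (List.replicate (count + 1).toNat (0:Int)).tail := by
      rw [chowla_alt_eq]
      unfold sieveFold
      rw [PySem.List.pyRange_one_eq_nil h2', List.foldl_nil, PySem.List.slice_from_one]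
    rw [e]
    unfold chowla
    rw [PySem.List.pyRange_one_eq_nil (by omega), List.foldl_nil]
    have hN : (count + 1).toNat = 0 ∨ (count + 1).toNat = 1 := by omega
    rcases hN with h | h <;> rw [h] <;> rfl
  · by_cases hc1 : count = 1
    · subst hc1
      decide
    · have hc : 2 ≤ count := by omega
      have hj : PySem.Int.floordiv count 2 + 1 = 2 + ((count / 2 - 1).toNat : Int) := by
        rw [PySem.Int.floordiv_eq_ediv_of_pos (by norm_num)]
        omega
      have eA : chowla count = (PySem.List.pyRange 1 (count + 1) 1).map
          (fun n => (PySem.List.pyRange 2 n 1).foldl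
            (fun s i => if PySem.Int.mod n i = 0 then s + i else s) 0) := by
        unfold chowla
        rw [PySem.List.foldl_append_singleton_eq_map, List.nil_append]
      have eB : chowla_alt count = (sieveFold count (2 + ((count / 2 - 1).toNat : Int))).tail := by
        rw [chowla_alt_eq, hj, PySem.List.slice_from_one]
      rw [eA, eB]
      apply List.ext_getElem
      · rw [List.length_map, PySem.List.length_pyRange_one, List.length_tail, sieveFold_length]
        omega
      · intro k h1 h2
        have hkc : (k : Int) < count := by
          rw [List.length_map, PySem.List.length_pyRange_one] at h1
          omega
        simp only [List.getElem_map]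
        rw [PySem.List.getElem_pyRange_one]
        rw [List.getElem_tail]
        have hlen3 : k + 1 < (sieveFold count (2 + ((count / 2 - 1).toNat : Int))).length := by
          rw [sieveFold_length]
          rw [List.length_tail, sieveFold_length] at h2
          omega
        rw [← List.getD_eq_getElem _ 0 hlen3]
        rw [sieveFold_getD count ((count / 2 - 1).toNat) (k + 1)]
        rw [foldl_if_mod_sum, zero_add]
        have hk : ((k + 1 : Nat) : Int) = 1 + (k : Int) := by push_cast; ring
        rw [hk]
        rw [filter_sum_eq count (1 + (k : Int)) hc (by omega) (by omega), hj]
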